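-- pv_equiv track=rewrite | github.com/Air2air/z-beam-generator | scripts/maintenance/normalize_safety_data.py | derive_toxic_gas_risk
-- ===== SOURCE A (Python) =====
-- from typing import Dict, Any, List, Optional
--
-- def derive_toxic_gas_risk(fumes_generated: List[Dict[str, Any]]) -> str:
--     """Derive toxic_gas_risk from fumes_generated hazard classes"""
--     if not fumes_generated:
--         return 'low'
--
--     hazard_classes = [f.get('hazard_class', '').lower() for f in fumes_generated]
--
--     # Critical: carcinogenic or highly toxic compounds
--     if 'carcinogenic' in hazard_classes or 'highly_toxic' in hazard_classes:
--         return 'critical'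
--
--     # High: toxic compounds
--     if 'toxic' in hazard_classes:
--         return 'high'
--
--     # Moderate: irritants
--     if 'irritant' in hazard_classes:
--         return 'moderate'
--
--     return 'low'
-- ===== SOURCE B (Python) =====
-- _SEVERITY = {'carcinogenic': 4, 'highly_toxic': 4, 'toxic': 3, 'irritant': 2}
-- _LABEL = {4: 'critical', 3: 'high', 2: 'moderate', 1: 'low'}
--
-- def derive_toxic_gas_risk(fumes_generated):
--     rank = 1
--     for f in fumes_generated:
--         rank = max(rank, _SEVERITY.get(f.get('hazard_class', '').lower(), 1))
--     return _LABEL[rank]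
-- ===== Notes on version B (the rewrite author's own statement) =====
-- stated objective: alternative
-- what changed: Replaced the intermediate list of hazard classes plus three separate membership scans by a single pass that folds each entry's severity rank into a running maximum, then maps the max rank back to a label.
import Mathlib
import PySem

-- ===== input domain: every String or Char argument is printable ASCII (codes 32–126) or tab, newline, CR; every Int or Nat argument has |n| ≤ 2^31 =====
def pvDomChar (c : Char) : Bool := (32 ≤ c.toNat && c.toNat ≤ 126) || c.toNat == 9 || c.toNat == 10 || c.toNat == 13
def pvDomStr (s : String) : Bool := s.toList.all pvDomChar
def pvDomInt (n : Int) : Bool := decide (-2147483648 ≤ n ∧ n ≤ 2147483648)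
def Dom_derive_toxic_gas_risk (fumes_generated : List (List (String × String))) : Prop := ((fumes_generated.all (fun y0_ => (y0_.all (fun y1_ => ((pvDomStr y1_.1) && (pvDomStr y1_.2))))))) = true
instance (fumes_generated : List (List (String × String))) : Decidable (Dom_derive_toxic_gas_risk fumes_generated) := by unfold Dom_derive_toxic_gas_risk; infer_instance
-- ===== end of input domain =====

-- B replaces the hazard-class list plus three membership scans by one fold keeping a running-max severity rank (alternative decomposition, same cost).

-- ===== PORT A =====
-- f.get('hazard_class', '') on the association list: first matching key, default ''
def pvDictGet (f : List (String × String)) : String :=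
  ((f.find? (fun p => p.1 == "hazard_class")).map Prod.snd).getD ""

def derive_toxic_gas_risk (fumes_generated : List (List (String × String))) : String :=
  if fumes_generated = [] then "low"
  else
    let hazard_classes := fumes_generated.map (fun f => PySem.Str.lower (pvDictGet f))
    if hazard_classes.contains "carcinogenic" || hazard_classes.contains "highly_toxic" then "critical"
    else if hazard_classes.contains "toxic" then "high"
    else if hazard_classes.contains "irritant" then "moderate"
    else "low"

-- ===== PORT B =====
-- _SEVERITY.get(s, 1)
def pvSeverity (s : String) : Nat :=
  if s = "carcinogenic" then 4 else if s = "highly_toxic" then 4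
  else if s = "toxic" then 3 else if s = "irritant" then 2 else 1

-- _LABEL[rank]
def pvLabel (rank : Nat) : String :=
  if rank = 4 then "critical" else if rank = 3 then "high"
  else if rank = 2 then "moderate" else "low"

def derive_toxic_gas_risk_alt (fumes_generated : List (List (String × String))) : String :=
  pvLabel (fumes_generated.foldl (fun rank f => max rank (pvSeverity (PySem.Str.lower (pvDictGet f)))) 1)

-- ===== PRECONDITION & SPEC =====
def Spec_derive_toxic_gas_risk (fumes_generated : List (List (String × String))) (out : String) : Prop := out = derive_toxic_gas_risk_alt fumes_generated
instance (fumes_generated : List (List (String × String))) (out : String) : Decidable (Spec_derive_toxic_gas_risk fumes_generated out) := by unfold Spec_derive_toxic_gas_risk; infer_instance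

-- ===== CLAIM (what is proved, stated in full; the proofs are below) =====
def Claim_equal_derive_toxic_gas_risk : Prop := ∀ (fumes_generated : List (List (String × String))), Dom_derive_toxic_gas_risk fumes_generated → Spec_derive_toxic_gas_risk fumes_generated (derive_toxic_gas_risk fumes_generated)

-- ===== LEMMAS AND PROOFS =====

-- the maximal severity over a list of (already lowercased) hazard classes, in A's if-chain form
def pvMaxSev (hs : List String) : Nat :=
  if hs.contains "carcinogenic" || hs.contains "highly_toxic" then 4
  else if hs.contains "toxic" then 3
  else if hs.contains "irritant" then 2
  else 1

theorem pvMaxSev_cons (x : String) (hs : List String) :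
    pvMaxSev (x :: hs) = max (pvSeverity x) (pvMaxSev hs) := by
  simp only [pvMaxSev, pvSeverity, List.contains_cons]
  by_cases h1 : x = "carcinogenic" <;> by_cases h2 : x = "highly_toxic" <;>
    by_cases h3 : x = "toxic" <;> by_cases h4 : x = "irritant" <;>
    simp [h1, h2, h3, h4] <;> split_ifs <;> simp_all [eq_comm]

theorem pvFold_eq_maxSev (hs : List String) (r : Nat) (hr : 1 ≤ r) :
    hs.foldl (fun rank s => max rank (pvSeverity s)) r = max r (pvMaxSev hs) := by
  induction hs generalizing r with
  | nil => simp [pvMaxSev]; omega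
  | cons x t ih =>
      have hr' : 1 ≤ max r (pvSeverity x) := by omega
      simp only [List.foldl_cons, ih _ hr', pvMaxSev_cons]
      omega

theorem pvSev_ge_one (hs : List String) : 1 ≤ pvMaxSev hs := by
  unfold pvMaxSev; split_ifs <;> omega

-- ===== VERDICT (by name: the statement is the Claim_ definition above) =====
theorem derive_toxic_gas_risk_spec : Claim_equal_derive_toxic_gas_risk := by
  intro fumes _
  unfold Spec_derive_toxic_gas_risk derive_toxic_gas_risk derive_toxic_gas_risk_alt
  have hfold : fumes.foldl (fun rank f => max rank (pvSeverity (PySem.Str.lower (pvDictGet f)))) 1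
      = pvMaxSev (fumes.map (fun f => PySem.Str.lower (pvDictGet f))) := by
    have := pvFold_eq_maxSev (fumes.map (fun f => PySem.Str.lower (pvDictGet f))) 1 (by omega)
    rw [List.foldl_map] at this
    rw [this]
    exact Nat.max_eq_right (pvSev_ge_one _)
  rw [hfold]
  by_cases hnil : fumes = []
  · simp [hnil, pvMaxSev, pvLabel]
  · simp only [hnil, if_false]
    set hs := fumes.map (fun f => PySem.Str.lower (pvDictGet f))
    unfold pvMaxSev pvLabel
    split_ifs <;> simp_all
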